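-- pv_equiv track=rewrite | github.com/gracenathh/PythonCode | z-algorithm.py | rev_z
-- ===== SOURCE A (Python) =====
-- def rev_z(txt):
--     """
--     This function is a reverse function of Gausfield's Z-Algorithm.
--     :param txt: a string contains text + $ + pattern.
--     The placement of text and pattern are switch since we are calculating reverse z-algorithm
--     :Best case: O(N+M) with N as the length of the pattern and M as the length of the text.
--     This happens when there is no pattern's occurrences in the text, thus we only do naive comparison.
--     :Worst case: O(N+M) with N as the length of the pattern and M as the length of the text.
--     This happens when pattern and text have the same characters, thus after naive comparison, we still need to check
--     the value inside the z-box.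
--     :Space complexity: O(N+M) with N as the length of the pattern and M as the length of the text for the z_array
--     :Aux space complexity: O(1)
--     :return z_array: an array containing the occurrences of the pattern in the text
--     """
--
--     # Step 1 - Initialise z-array with the length of txt and insert length of txt into z_arr[-1]
--     z_arr = [0] * len(txt)
--     z_arr[-1] = len(txt)
--
--     # Step 2 - Set left, right, and k pointers to length(text) - 1 and rplus = 1 as the offset to calculate k
--     l = r = k = len(txt) - 1
--     rplus = 1
--
--     # Step 3 - Loop through the txt starting from the last position + 1
--     for i in range(z_arr[-1] - 2, -1, -1):
--         # case 1: i is outside the z-box -> do naive comparison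
--         if i < l:
--             if rplus + i != len(z_arr) - 1:
--                 rplus = len(z_arr) - i - 1
--
--             l, r = i, i
--
--             while l > -1 and txt[r + rplus] == txt[l]:
--                 l -= 1
--                 rplus -= 1
--
--             z_arr[i] = r - l
--
--             if z_arr[i] == 0:
--                 rplus += 1
--             else:
--                 rplus += z_arr[i]
--                 l += 1
--
--         else:
--             # find k
--             k = i + rplus
--
--             # find remaining
--             rem = i - l + 1
--
--             # case 2a: z[k] < remaining -> z[i] = z[k]
--             if z_arr[k] < rem:
--                 z_arr[i] = z_arr[k]
--
--             # case 2b: z[k] > remaining -> z[i] = remaining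
--             elif z_arr[k] > rem:
--                 z_arr[i] = rem
--
--             # case 2c: z[k] == remaining
--             # compare all additional character
--             else:
--                 new_l = l - 1
--
--                 while new_l > -1 and txt[len(z_arr) - 1 - (i - new_l)] == txt[new_l]:
--                     new_l -= 1
--
--                 z_arr[i] = i - new_l
--
--                 r = i
--                 l = new_l + 1
--                 rplus = len(z_arr) - 1 - r
--
--     # Step 4 - Return z_arr
--     return z_arr
-- ===== SOURCE B (Python) =====
-- def rev_z(txt):
--     # Brute force: z_arr[i] = length of longest common suffix of txt[:i+1] and txt,
--     # computed by direct comparison instead of the z-box machinery.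
--     n = len(txt)
--     z_arr = [0] * n
--     z_arr[-1] = n
--     for i in range(n - 1):
--         L = 0
--         while L <= i and txt[i - L] == txt[n - 1 - L]:
--             L += 1
--         z_arr[i] = L
--     return z_arr
-- ===== Notes on version B (the rewrite author's own statement) =====
-- stated objective: simpler
-- what changed: Replaces the stateful z-box machinery (left/right pointers, mirror lookups, three box cases) with a direct brute-force scan that recomputes each longest-suffix-match length by character comparison.
import Mathlib
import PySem

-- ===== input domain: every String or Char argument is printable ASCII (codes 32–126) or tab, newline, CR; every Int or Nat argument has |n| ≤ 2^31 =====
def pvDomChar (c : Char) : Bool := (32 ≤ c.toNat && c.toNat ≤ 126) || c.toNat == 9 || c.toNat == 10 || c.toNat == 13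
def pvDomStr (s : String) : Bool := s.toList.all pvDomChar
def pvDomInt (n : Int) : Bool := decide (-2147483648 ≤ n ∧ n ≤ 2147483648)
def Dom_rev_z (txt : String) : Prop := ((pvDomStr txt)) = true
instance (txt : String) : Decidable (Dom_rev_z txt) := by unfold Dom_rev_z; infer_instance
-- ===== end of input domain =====

-- B replaces A's z-box scan with a direct brute-force suffix-match scan (simpler, no speed claim);
-- equivalence is about the return value; both Pythons raise IndexError on the empty string (excluded by Pre_).

-- ===== PORT A =====

-- while l > -1 and txt[r + rplus] == txt[l]: l -= 1; rplus -= 1   (returns final (l, rplus))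
def revzWhile1 (cs : List Char) (r l rplus : Int) : Int × Int :=
  if h : -1 < l ∧ PySem.List.pyGet? cs (r + rplus) = PySem.List.pyGet? cs l then
    revzWhile1 cs r (l - 1) (rplus - 1)
  else (l, rplus)
termination_by (l + 1).toNat
decreasing_by omega

-- while new_l > -1 and txt[len(z_arr) - 1 - (i - new_l)] == txt[new_l]: new_l -= 1
def revzWhile2 (cs : List Char) (lenz i new_l : Int) : Int :=
  if h : -1 < new_l ∧ PySem.List.pyGet? cs (lenz - 1 - (i - new_l)) = PySem.List.pyGet? cs new_l then
    revzWhile2 cs lenz i (new_l - 1)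
  else new_l
termination_by (new_l + 1).toNat
decreasing_by omega

-- one iteration of A's main for-loop; state = (z_arr, l, r, k, rplus)
def revzStep (cs : List Char) (s : List Int × Int × Int × Int × Int) (i : Int) :
    List Int × Int × Int × Int × Int :=
  let (z, l, r, k, rplus) := s
  if i < l then
    let rplus1 := if rplus + i ≠ PySem.List.len z - 1 then PySem.List.len z - i - 1 else rplus
    let l1 := i
    let r1 := i
    let p := revzWhile1 cs r1 l1 rplus1
    let z1 := PySem.List.pySetD z i (r1 - p.1)
    if PySem.List.pyGetD z1 i 0 = 0 then
      (z1, p.1, r1, k, p.2 + 1)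
    else
      (z1, p.1 + 1, r1, k, p.2 + PySem.List.pyGetD z1 i 0)
  else
    let k1 := i + rplus
    let rem := i - l + 1
    if PySem.List.pyGetD z k1 0 < rem then
      (PySem.List.pySetD z i (PySem.List.pyGetD z k1 0), l, r, k1, rplus)
    else if PySem.List.pyGetD z k1 0 > rem then
      (PySem.List.pySetD z i rem, l, r, k1, rplus)
    else
      let new_l := revzWhile2 cs (PySem.List.len z) i (l - 1)
      (PySem.List.pySetD z i (i - new_l), new_l + 1, i, k1, PySem.List.len z - 1 - i)

def rev_z (txt : String) : List Int :=
  let cs := txt.toList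
  let n := PySem.Str.len txt
  let z0 := List.replicate n.toNat (0 : Int)
  let z1 := PySem.List.pySetD z0 (-1) n
  ((PySem.List.pyRange (PySem.List.pyGetD z1 (-1) 0 - 2) (-1) (-1)).foldl
    (revzStep cs) (z1, n - 1, n - 1, n - 1, 1)).1

-- ===== PORT B =====

-- while L <= i and txt[i - L] == txt[n - 1 - L]: L += 1
def revzAltWhile (cs : List Char) (i L : Nat) : Nat :=
  if h : L ≤ i ∧ (cs[i - L]?) = (cs[cs.length - 1 - L]?) then revzAltWhile cs i (L + 1) else L
termination_by i + 1 - L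
decreasing_by omega

def rev_z_alt (txt : String) : List Int :=
  let cs := txt.toList
  let n := cs.length
  let z0 := PySem.List.pySetD (List.replicate n (0 : Int)) (-1) (n : Int)
  (List.range (n - 1)).foldl (fun z (i : Nat) => PySem.List.pySetD z (i : Int) ((revzAltWhile cs i 0 : Nat) : Int)) z0

-- ===== PRECONDITION & SPEC =====
-- A (and B) raise IndexError on the empty string (z_arr[-1] on an empty list); Pre_ excludes exactly that input.
def Pre_rev_z (txt : String) : Prop := txt ≠ ""
instance (txt : String) : Decidable (Pre_rev_z txt) := by unfold Pre_rev_z; infer_instance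
def pvWitness_rev_z : String := "aacaba"

def Spec_rev_z (txt : String) (out : List Int) : Prop := out = rev_z_alt txt
instance (txt : String) (out : List Int) : Decidable (Spec_rev_z txt out) := by unfold Spec_rev_z; infer_instance

-- ===== CLAIM (what is proved, stated in full; the proofs are below) =====
def Claim_equal_rev_z : Prop := ∀ (txt : String), Dom_rev_z txt → Pre_rev_z txt → Spec_rev_z txt (rev_z txt)

-- ===== LEMMAS AND PROOFS =====

lemma bw_step (cs : List Char) (i L : Nat) (h : L ≤ i ∧ cs[i - L]? = cs[cs.length - 1 - L]?) :
    revzAltWhile cs i L = revzAltWhile cs i (L + 1) := by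
  rw [revzAltWhile, dif_pos h]

lemma bw_stop' (cs : List Char) (i L : Nat) (h : ¬ (L ≤ i ∧ cs[i - L]? = cs[cs.length - 1 - L]?)) :
    revzAltWhile cs i L = L := by
  rw [revzAltWhile, dif_neg h]

lemma bw_le (cs : List Char) (i L : Nat) (h : L ≤ i + 1) :
    L ≤ revzAltWhile cs i L ∧ revzAltWhile cs i L ≤ i + 1 := by
  by_cases hc : (L ≤ i ∧ cs[i - L]? = cs[cs.length - 1 - L]?)
  · rw [bw_step cs i L hc]
    have := bw_le cs i (L + 1) (by omega)
    omega
  · rw [bw_stop' cs i L hc]; omega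
termination_by i + 1 - L
decreasing_by omega

lemma bw_match (cs : List Char) (i L : Nat) :
    ∀ j, L ≤ j → j < revzAltWhile cs i L → cs[i - j]? = cs[cs.length - 1 - j]? := by
  intro j hj hj2
  by_cases hc : (L ≤ i ∧ cs[i - L]? = cs[cs.length - 1 - L]?)
  · rw [bw_step cs i L hc] at hj2
    rcases Nat.eq_or_lt_of_le hj with rfl | hlt
    · exact hc.2
    · exact bw_match cs i (L + 1) j hlt hj2
  · rw [bw_stop' cs i L hc] at hj2; omega
termination_by i + 1 - L
decreasing_by omega

lemma bw_stop (cs : List Char) (i L : Nat) (h : L ≤ i + 1) :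
    revzAltWhile cs i L = i + 1 ∨ cs[i - revzAltWhile cs i L]? ≠ cs[cs.length - 1 - revzAltWhile cs i L]? := by
  by_cases hc : (L ≤ i ∧ cs[i - L]? = cs[cs.length - 1 - L]?)
  · rw [bw_step cs i L hc]; exact bw_stop cs i (L + 1) (by omega)
  · rw [bw_stop' cs i L hc]
    by_cases hL : L ≤ i
    · right; intro hcontra; exact hc ⟨hL, hcontra⟩
    · left; omega
termination_by i + 1 - L
decreasing_by omega

lemma bw_unique (cs : List Char) (i L M : Nat) (hLM : L ≤ M) (hM : M ≤ i + 1)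
    (hmatch : ∀ j, L ≤ j → j < M → cs[i - j]? = cs[cs.length - 1 - j]?)
    (hstop : M = i + 1 ∨ cs[i - M]? ≠ cs[cs.length - 1 - M]?) :
    revzAltWhile cs i L = M := by
  by_cases hc : (L ≤ i ∧ cs[i - L]? = cs[cs.length - 1 - L]?)
  · rw [bw_step cs i L hc]
    rcases Nat.eq_or_lt_of_le hLM with rfl | hlt
    · exfalso; rcases hstop with h1 | h2
      · omega
      · exact h2 hc.2
    · exact bw_unique cs i (L + 1) M hlt hM (fun j hj hj2 => hmatch j (by omega) hj2) hstop
  · rw [bw_stop' cs i L hc]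
    rcases Nat.eq_or_lt_of_le hLM with rfl | hlt
    · rfl
    · exfalso; exact hc ⟨by omega, hmatch L le_rfl hlt⟩
termination_by i + 1 - L
decreasing_by omega

lemma bw_prepend (cs : List Char) (i L : Nat) (hL : L ≤ i + 1)
    (hm : ∀ j, j < L → cs[i - j]? = cs[cs.length - 1 - j]?) :
    revzAltWhile cs i 0 = revzAltWhile cs i L := by
  have hle := bw_le cs i L hL
  refine bw_unique cs i 0 (revzAltWhile cs i L) (by omega) hle.2 ?_ (bw_stop cs i L hL)
  intro j _ hj2
  by_cases hjL : j < L
  · exact hm j hjL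
  · exact bw_match cs i L j (by omega) hj2

lemma while1_eq (cs : List Char) (i L : Nat) (hi : i + 2 ≤ cs.length) (_hL : L ≤ i + 1) :
    revzWhile1 cs (i : Int) ((i : Int) - L) ((cs.length : Int) - 1 - i - L)
      = ((i : Int) - revzAltWhile cs i L, (cs.length : Int) - 1 - i - revzAltWhile cs i L) := by
  by_cases hc : (L ≤ i ∧ cs[i - L]? = cs[cs.length - 1 - L]?)
  · rw [bw_step cs i L hc]
    rw [revzWhile1, dif_pos ?_]
    · have e1 : (i : Int) - L - 1 = (i : Int) - (L + 1 : Nat) := by push_cast; ring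
      have e2 : (cs.length : Int) - 1 - i - L - 1 = (cs.length : Int) - 1 - i - (L + 1 : Nat) := by push_cast; ring
      rw [e1, e2]
      exact while1_eq cs i (L + 1) hi (by omega)
    · constructor
      · omega
      · have e3 : (i : Int) + ((cs.length : Int) - 1 - i - L) = ((cs.length - 1 - L : Nat) : Int) := by
          omega
        have e4 : (i : Int) - L = ((i - L : Nat) : Int) := by omega
        rw [e3, e4, PySem.List.pyGet?_natCast, PySem.List.pyGet?_natCast]
        exact hc.2.symm
  · rw [bw_stop' cs i L hc]
    rw [revzWhile1, dif_neg ?_]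
    rintro ⟨h1, h2⟩
    have hLi : L ≤ i := by omega
    have e3 : (i : Int) + ((cs.length : Int) - 1 - i - L) = ((cs.length - 1 - L : Nat) : Int) := by
      omega
    have e4 : (i : Int) - L = ((i - L : Nat) : Int) := by omega
    rw [e3, e4, PySem.List.pyGet?_natCast, PySem.List.pyGet?_natCast] at h2
    exact hc ⟨hLi, h2.symm⟩
termination_by i + 1 - L
decreasing_by omega

lemma while2_eq (cs : List Char) (i L : Nat) (hi : i + 2 ≤ cs.length) (_hL : L ≤ i + 1) :
    revzWhile2 cs (cs.length : Int) (i : Int) ((i : Int) - L) = (i : Int) - revzAltWhile cs i L := by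
  by_cases hc : (L ≤ i ∧ cs[i - L]? = cs[cs.length - 1 - L]?)
  · rw [bw_step cs i L hc]
    rw [revzWhile2, dif_pos ?_]
    · have e1 : (i : Int) - L - 1 = (i : Int) - (L + 1 : Nat) := by push_cast; ring
      rw [e1]
      exact while2_eq cs i (L + 1) hi (by omega)
    · constructor
      · omega
      · have e3 : (cs.length : Int) - 1 - ((i : Int) - ((i : Int) - L)) = ((cs.length - 1 - L : Nat) : Int) := by
          omega
        have e4 : (i : Int) - L = ((i - L : Nat) : Int) := by omega
        rw [e3, e4, PySem.List.pyGet?_natCast, PySem.List.pyGet?_natCast]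
        exact hc.2.symm
  · rw [bw_stop' cs i L hc]
    rw [revzWhile2, dif_neg ?_]
    rintro ⟨h1, h2⟩
    have hLi : L ≤ i := by omega
    have e3 : (cs.length : Int) - 1 - ((i : Int) - ((i : Int) - L)) = ((cs.length - 1 - L : Nat) : Int) := by
      omega
    have e4 : (i : Int) - L = ((i - L : Nat) : Int) := by omega
    rw [e3, e4, PySem.List.pyGet?_natCast, PySem.List.pyGet?_natCast] at h2
    exact hc ⟨hLi, h2.symm⟩
termination_by i + 1 - L
decreasing_by omega

-- inside a valid maximal z-box [ln, rn] (anchored at rn), characters at i mirror to kn := i + (n-1) - rn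
lemma box_translate (cs : List Char) (ln i rn : Nat)
    (hln : ln ≤ i) (hir : i < rn) (hrn : rn + 2 ≤ cs.length)
    (hbox : revzAltWhile cs rn 0 = rn - ln + 1) :
    ∀ j, j ≤ i - ln → cs[i - j]? = cs[(i + (cs.length - 1) - rn) - j]? := by
  intro j hj
  have h1 := bw_match cs rn 0 (rn - i + j) (by omega) (by omega)
  have e1 : rn - (rn - i + j) = i - j := by omega
  have e2 : cs.length - 1 - (rn - i + j) = (i + (cs.length - 1) - rn) - j := by omega
  rw [e1, e2] at h1
  exact h1

lemma case2a (cs : List Char) (ln i rn : Nat)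
    (hln : ln ≤ i) (hir : i < rn) (hrn : rn + 2 ≤ cs.length)
    (hbox : revzAltWhile cs rn 0 = rn - ln + 1)
    (h2a : revzAltWhile cs (i + (cs.length - 1) - rn) 0 < i - ln + 1) :
    revzAltWhile cs i 0 = revzAltWhile cs (i + (cs.length - 1) - rn) 0 := by
  set kn := i + (cs.length - 1) - rn with hkn
  set M := revzAltWhile cs kn 0 with hM
  have hkb : i + 1 ≤ kn ∧ kn + 2 ≤ cs.length := by omega
  refine bw_unique cs i 0 M (by omega) (by omega) ?_ ?_
  · intro j _ hj2
    rw [box_translate cs ln i rn hln hir hrn hbox j (by omega)]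
    exact bw_match cs kn 0 j (by omega) hj2
  · right
    rcases bw_stop cs kn 0 (by omega) with h1 | h2
    · omega
    · rw [box_translate cs ln i rn hln hir hrn hbox M (by omega)]
      exact h2

lemma case2b (cs : List Char) (ln i rn : Nat)
    (hln : ln ≤ i) (hir : i < rn) (hrn : rn + 2 ≤ cs.length)
    (hbox : revzAltWhile cs rn 0 = rn - ln + 1)
    (h2b : i - ln + 1 < revzAltWhile cs (i + (cs.length - 1) - rn) 0) :
    revzAltWhile cs i 0 = i - ln + 1 := by
  set kn := i + (cs.length - 1) - rn with hkn
  have hkb : i + 1 ≤ kn ∧ kn + 2 ≤ cs.length := by omega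
  have hmatch : ∀ j, 0 ≤ j → j < i - ln + 1 → cs[i - j]? = cs[cs.length - 1 - j]? := by
    intro j _ hj2
    rw [box_translate cs ln i rn hln hir hrn hbox j (by omega)]
    exact bw_match cs kn 0 j (by omega) (by omega)
  refine bw_unique cs i 0 (i - ln + 1) (by omega) (by omega) hmatch ?_
  by_cases hl0 : ln = 0
  · left; omega
  · right
    -- mismatch at rem = i - ln + 1: cs[ln-1] ≠ cs[n-1-(rn-ln+1)] = cs[n-1-rem]
    rcases bw_stop cs rn 0 (by omega) with h1 | h2
    · omega
    · rw [hbox] at h2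
      have e1 : rn - (rn - ln + 1) = ln - 1 := by omega
      rw [e1] at h2
      -- match of kn at offset rem: cs[kn - rem]? = cs[n - 1 - rem]?, kn - rem = n-1-(rn-ln+1)
      have h3 := bw_match cs kn 0 (i - ln + 1) (by omega) (by omega)
      have e2 : kn - (i - ln + 1) = cs.length - 1 - (rn - ln + 1) := by omega
      rw [e2] at h3
      have e3 : i - (i - ln + 1) = ln - 1 := by omega
      rw [e3, ← h3]
      exact h2

lemma case2c (cs : List Char) (ln i rn : Nat)
    (hln : ln ≤ i) (hir : i < rn) (hrn : rn + 2 ≤ cs.length)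
    (hbox : revzAltWhile cs rn 0 = rn - ln + 1)
    (h2c : revzAltWhile cs (i + (cs.length - 1) - rn) 0 = i - ln + 1) :
    revzAltWhile cs i 0 = revzAltWhile cs i (i - ln + 1) := by
  set kn := i + (cs.length - 1) - rn with hkn
  have hkb : i + 1 ≤ kn ∧ kn + 2 ≤ cs.length := by omega
  refine bw_prepend cs i (i - ln + 1) (by omega) ?_
  intro j hj
  rw [box_translate cs ln i rn hln hir hrn hbox j (by omega)]
  exact bw_match cs kn 0 j (by omega) (by omega)

-- intended final array entry at position j
def rzOut (cs : List Char) (j : Nat) : Int :=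
  if j = cs.length - 1 then (cs.length : Int) else (revzAltWhile cs j 0 : Int)

-- invariant of A's fold after m iterations (next index to process is n-2-m); s = (z, l, r, k, rplus)
def rzInv (cs : List Char) (m : Nat) (s : List Int × Int × Int × Int × Int) : Prop :=
  s.1.length = cs.length ∧
  (∀ j : Nat, j < cs.length →
    (cs.length - 1 - m ≤ j → s.1[j]? = some (rzOut cs j)) ∧
    (j + m + 1 < cs.length → s.1[j]? = some (0 : Int))) ∧
  (m + 1 < cs.length →
    (((cs.length - 2 - m : Nat) : Int) < s.2.1 ∨
      (s.2.1 ≤ ((cs.length - 2 - m : Nat) : Int) ∧ 0 ≤ s.2.1 ∧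
       ((cs.length - 2 - m : Nat) : Int) < s.2.2.1 ∧ s.2.2.1 ≤ (cs.length : Int) - 2 ∧
       s.2.2.2.2 = (cs.length : Int) - 1 - s.2.2.1 ∧
       ((revzAltWhile cs s.2.2.1.toNat 0 : Int) = s.2.2.1 - s.2.1 + 1))))

lemma arrStep (cs : List Char) (m : Nat) (z : List Int) (hm : m + 1 < cs.length)
    (hlen : z.length = cs.length)
    (harr : ∀ j : Nat, j < cs.length →
      (cs.length - 1 - m ≤ j → z[j]? = some (rzOut cs j)) ∧
      (j + m + 1 < cs.length → z[j]? = some (0 : Int)))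
    (v : Int) (hv : v = rzOut cs (cs.length - 2 - m)) :
    ∀ j : Nat, j < cs.length →
      (cs.length - 1 - (m + 1) ≤ j → (z.set (cs.length - 2 - m) v)[j]? = some (rzOut cs j)) ∧
      (j + (m + 1) + 1 < cs.length → (z.set (cs.length - 2 - m) v)[j]? = some (0 : Int)) := by
  intro j hj
  by_cases hji : j = cs.length - 2 - m
  · subst hji
    rw [List.getElem?_set_self (by omega)]
    constructor
    · intro _; rw [hv]
    · omega
  · rw [List.getElem?_set_ne (by omega)]
    have := harr j hj
    constructor
    · intro hge; exact this.1 (by omega)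
    · intro hlt; exact this.2 (by omega)

lemma rzStepInv (cs : List Char) (m : Nat) (z : List Int) (l r k rplus : Int)
    (hm : m + 1 < cs.length) (h : rzInv cs m (z, l, r, k, rplus)) :
    rzInv cs (m + 1) (revzStep cs (z, l, r, k, rplus) ((cs.length - 2 - m : Nat) : Int)) := by
  simp only [rzInv] at h
  obtain ⟨hlen, harr, hptr⟩ := h
  set n := cs.length with hn
  set i : Nat := n - 2 - m with hidef
  have hi2 : i + 2 ≤ n := by omega
  have him : i + m + 2 = n := by omega
  have hzb_le := bw_le cs i 0 (by omega)
  set Z : Nat := revzAltWhile cs i 0 with hZ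
  have hlenz : PySem.List.len z = (n : Int) := by
    simp [PySem.List.len_eq, hlen]
  simp only [revzStep]
  rcases hptr hm with hA | ⟨hl1, hl0, hir, hrn2, hrp, hbox⟩
  · -- i < l : naive scan
    rw [if_pos hA]
    have hrp1 : (if rplus + ((i : Nat) : Int) ≠ PySem.List.len z - 1 then PySem.List.len z - ((i : Nat) : Int) - 1 else rplus) = (n : Int) - 1 - i := by
      rw [hlenz]; split_ifs with hc
      · ring
      · omega
    rw [hrp1]
    have hw1 : revzWhile1 cs ((i : Nat) : Int) ((i : Nat) : Int) ((n : Int) - 1 - i)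
        = ((i : Int) - Z, (n : Int) - 1 - i - Z) := by
      have := while1_eq cs i 0 (by omega) (by omega)
      simpa using this
    rw [hw1]
    have hvz : ((i : Nat) : Int) - ((i : Int) - Z) = (Z : Int) := by ring
    have hsetz : PySem.List.pySetD z ((i : Nat) : Int) (((i : Nat) : Int) - ((i : Int) - Z)) = z.set i (Z : Int) := by
      rw [hvz, PySem.List.pySetD_natCast]
    rw [hsetz]
    have hget : PySem.List.pyGetD (z.set i ((Z : Nat) : Int)) ((i : Nat) : Int) 0 = (Z : Int) := by
      rw [PySem.List.pyGetD_natCast, List.getD_eq_getElem?_getD, List.getElem?_set_self (by omega)]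
      rfl
    have harr' := arrStep cs m z hm hlen harr (Z : Int) (by rw [rzOut, if_neg (by omega)])
    have hlen' : (z.set i ((Z : Nat) : Int)).length = n := by
      rw [List.length_set]; exact hlen
    by_cases hZ0 : Z = 0
    · rw [hget, if_pos (by exact_mod_cast congrArg (Nat.cast : Nat → Int) hZ0)]
      simp only [rzInv]
      refine ⟨hlen', harr', ?_⟩
      intro hm2
      left
      have : ((n - 2 - (m + 1) : Nat) : Int) < (i : Int) - (Z : Int) := by omega
      exact this
    · rw [hget, if_neg (by exact_mod_cast fun hh => hZ0 (by exact_mod_cast hh))]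
      simp only [rzInv]
      refine ⟨hlen', harr', ?_⟩
      intro hm2
      by_cases hsm : ((n - 2 - (m + 1) : Nat) : Int) < (i : Int) - Z + 1
      · left; exact hsm
      · right
        refine ⟨by omega, by omega, by omega, by omega, by ring, ?_⟩
        have : ((i : Int)).toNat = i := by omega
        rw [this]
        omega
  · -- i >= l : z-box reuse
    rw [if_neg (by omega)]
    set ln : Nat := l.toNat with hlnn
    set rn : Nat := r.toNat with hrnn
    have hlln : l = (ln : Int) := by omega
    have hrrn : r = (rn : Int) := by omega
    have hlni : ln ≤ i := by omega
    have hirn : i < rn := by omega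
    have hrn2' : rn + 2 ≤ n := by omega
    have hboxn : revzAltWhile cs rn 0 = rn - ln + 1 := by
      rw [hrnn] at hbox ⊢; omega
    set kn : Nat := i + (n - 1) - rn with hknn
    have hk1 : ((i : Nat) : Int) + rplus = (kn : Int) := by
      rw [hrp]; omega
    rw [hk1]
    have hknlt : kn < n := by omega
    have hzk : PySem.List.pyGetD z ((kn : Nat) : Int) 0 = ((revzAltWhile cs kn 0 : Nat) : Int) := by
      rw [PySem.List.pyGetD_natCast, List.getD_eq_getElem?_getD,
        (harr kn hknlt).1 (by omega), Option.getD_some, rzOut, if_neg (by omega)]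
    rw [hzk]
    set K : Nat := revzAltWhile cs kn 0 with hK
    have hrem : ((i : Nat) : Int) - l + 1 = ((i - ln + 1 : Nat) : Int) := by omega
    by_cases hca : K < i - ln + 1
    · rw [if_pos (by omega)]
      have hzi : Z = K := case2a cs ln i rn hlni hirn hrn2' hboxn (by omega)
      have hsetz : PySem.List.pySetD z ((i : Nat) : Int) ((K : Nat) : Int) = z.set i (Z : Int) := by
        rw [PySem.List.pySetD_natCast, hzi]
      rw [hsetz]
      simp only [rzInv]
      refine ⟨by rw [List.length_set]; exact hlen,
        arrStep cs m z hm hlen harr (Z : Int) (by rw [rzOut, if_neg (by omega)]), ?_⟩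
      intro hm2
      by_cases hsm : ((n - 2 - (m + 1) : Nat) : Int) < l
      · left; exact hsm
      · right
        refine ⟨by omega, by omega, by omega, by omega, hrp, hbox⟩
    · rw [if_neg (by omega)]
      by_cases hcb : K > i - ln + 1
      · rw [if_pos (by omega), hrem]
        have hzi : Z = i - ln + 1 := case2b cs ln i rn hlni hirn hrn2' hboxn (by omega)
        have hsetz : PySem.List.pySetD z ((i : Nat) : Int) ((i - ln + 1 : Nat) : Int) = z.set i (Z : Int) := by
          rw [PySem.List.pySetD_natCast, hzi]
        rw [hsetz]
        simp only [rzInv]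
        refine ⟨by rw [List.length_set]; exact hlen,
          arrStep cs m z hm hlen harr (Z : Int) (by rw [rzOut, if_neg (by omega)]), ?_⟩
        intro hm2
        by_cases hsm : ((n - 2 - (m + 1) : Nat) : Int) < l
        · left; exact hsm
        · right
          refine ⟨by omega, by omega, by omega, by omega, hrp, hbox⟩
      · rw [if_neg (by omega)]
        have hcc : K = i - ln + 1 := by omega
        set Z2 : Nat := revzAltWhile cs i (i - ln + 1) with hZ2
        have hzi : Z = Z2 := case2c cs ln i rn hlni hirn hrn2' hboxn hcc
        have hZ2le := bw_le cs i (i - ln + 1) (by omega)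
        have hw2 : revzWhile2 cs (PySem.List.len z) ((i : Nat) : Int) (l - 1) = (i : Int) - Z2 := by
          rw [hlenz]
          have e1 : l - 1 = (i : Int) - ((i - ln + 1 : Nat) : Int) := by omega
          rw [e1]
          exact while2_eq cs i (i - ln + 1) (by omega) (by omega)
        rw [hw2]
        have hvz : ((i : Nat) : Int) - ((i : Int) - Z2) = (Z : Int) := by rw [hzi]; ring
        have hsetz : PySem.List.pySetD z ((i : Nat) : Int) (((i : Nat) : Int) - ((i : Int) - Z2)) = z.set i (Z : Int) := by
          rw [hvz, PySem.List.pySetD_natCast]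
        rw [hsetz]
        simp only [rzInv]
        refine ⟨by rw [List.length_set]; exact hlen,
          arrStep cs m z hm hlen harr (Z : Int) (by rw [rzOut, if_neg (by omega)]), ?_⟩
        intro hm2
        by_cases hsm : ((n - 2 - (m + 1) : Nat) : Int) < (i : Int) - Z2 + 1
        · left; exact hsm
        · right
          have hZ2pos : 1 ≤ Z2 := by omega
          refine ⟨by omega, by omega, by omega, by omega, by rw [hlenz], ?_⟩
          have : (((i : Nat) : Int)).toNat = i := by omega
          rw [this]
          omega

lemma z1_eq (cs : List Char) (h : 1 ≤ cs.length) :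
    PySem.List.pySetD (List.replicate cs.length (0:Int)) (-1) (cs.length : Int)
      = (List.replicate cs.length (0:Int)).set (cs.length - 1) (cs.length : Int) := by
  simp [PySem.List.pySetD, PySem.List.pySet?, PySem.List.pyIdx?, h]

lemma z1_len (cs : List Char) :
    ((List.replicate cs.length (0:Int)).set (cs.length - 1) (cs.length : Int)).length = cs.length := by
  simp

lemma z1_get (cs : List Char) (h : 1 ≤ cs.length) (j : Nat) (hj : j < cs.length) :
    ((List.replicate cs.length (0:Int)).set (cs.length - 1) (cs.length : Int))[j]?
      = some (if j = cs.length - 1 then (cs.length : Int) else 0) := by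
  by_cases hje : j = cs.length - 1
  · subst hje
    rw [List.getElem?_set_self (by simpa using hj), if_pos rfl]
  · rw [List.getElem?_set_ne (by omega), if_neg hje, List.getElem?_replicate, if_pos hj]

lemma rzBase (cs : List Char) (h : 1 ≤ cs.length) :
    rzInv cs 0 ((List.replicate cs.length (0:Int)).set (cs.length - 1) (cs.length : Int),
      (cs.length : Int) - 1, (cs.length : Int) - 1, (cs.length : Int) - 1, 1) := by
  simp only [rzInv]
  refine ⟨z1_len cs, ?_, ?_⟩
  · intro j hj
    rw [z1_get cs h j hj]
    constructor
    · intro hge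
      have hje : j = cs.length - 1 := by omega
      rw [if_pos hje, rzOut, if_pos hje]
    · intro hlt
      rw [if_neg (by omega)]
  · intro hm
    left
    omega

lemma rzFold (cs : List Char) (s0 : List Int × Int × Int × Int × Int) (h0 : rzInv cs 0 s0) :
    ∀ m, m + 1 ≤ cs.length →
      rzInv cs m ((List.range m).foldl (fun s (k : Nat) => revzStep cs s ((cs.length : Int) - 2 - (k : Int))) s0) := by
  intro m
  induction m with
  | zero => intro _; simpa using h0
  | succ m ih =>
      intro hm
      rw [List.range_succ, List.foldl_append, List.foldl_cons, List.foldl_nil]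
      rcases hs : (List.range m).foldl (fun s (k : Nat) => revzStep cs s ((cs.length : Int) - 2 - (k : Int))) s0 with ⟨z, l, r, k, rp⟩
      have hinv := ih (by omega)
      rw [hs] at hinv
      have e : (cs.length : Int) - 2 - (m : Nat) = ((cs.length - 2 - m : Nat) : Int) := by omega
      rw [e]
      exact rzStepInv cs m z l r k rp (by omega) hinv

lemma altFold (cs : List Char) :
    ∀ (m : Nat) (z : List Int), z.length = cs.length → m ≤ cs.length →
      (((List.range m).foldl (fun z (i : Nat) => PySem.List.pySetD z (i : Int) ((revzAltWhile cs i 0 : Nat) : Int)) z).length = cs.length ∧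
       ∀ j : Nat, ((List.range m).foldl (fun z (i : Nat) => PySem.List.pySetD z (i : Int) ((revzAltWhile cs i 0 : Nat) : Int)) z)[j]?
          = if j < m then some ((revzAltWhile cs j 0 : Nat) : Int) else z[j]?) := by
  intro m
  induction m with
  | zero =>
      intro z hz _
      constructor
      · simpa using hz
      · intro j; simp
  | succ m ih =>
      intro z hz hm
      rw [List.range_succ, List.foldl_append, List.foldl_cons, List.foldl_nil]
      obtain ⟨ihlen, ihget⟩ := ih z hz (by omega)
      rw [PySem.List.pySetD_natCast]
      constructor
      · rw [List.length_set]; exact ihlen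
      · intro j
        by_cases hjm : j = m
        · subst hjm
          rw [List.getElem?_set_self (by omega), if_pos (by omega)]
        · rw [List.getElem?_set_ne (by omega), ihget j]
          by_cases hj1 : j < m
          · rw [if_pos hj1, if_pos (by omega)]
          · rw [if_neg hj1, if_neg (by omega)]

theorem rev_z_eq_alt (txt : String) (h : txt ≠ "") : rev_z txt = rev_z_alt txt := by
  have hcs : txt.toList ≠ [] := by simpa [String.toList_eq_nil_iff] using h
  have hn : 1 ≤ txt.toList.length := List.length_pos_iff.mpr hcs
  set cs := txt.toList with hcsdef
  have hlen : PySem.Str.len txt = (cs.length : Int) := by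
    simp [PySem.Str.len_eq, hcsdef]
  have hz1len := z1_len cs
  have hlast : PySem.List.pyGetD ((List.replicate cs.length (0:Int)).set (cs.length - 1) (cs.length : Int)) (-1) 0 = (cs.length : Int) := by
    rw [show (-1:Int) = -((1:Nat):Int) by norm_num,
        PySem.List.pyGetD_neg_natCast _ _ _ (by omega) (by omega)]
    rw [List.getElem_eq_iff]
    have := z1_get cs hn (cs.length - 1) (by omega)
    rw [if_pos rfl] at this
    rw [show ((List.replicate cs.length (0:Int)).set (cs.length - 1) (cs.length : Int)).length - 1 = cs.length - 1 by omega]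
    exact this
  have hrange : PySem.List.pyRange ((cs.length : Int) - 2) (-1) (-1)
      = (List.range (cs.length - 1)).map (fun k : Nat => (cs.length : Int) - 2 - (k : Int)) := by
    rw [PySem.List.pyRange_neg_one, show (((cs.length : Int) - 2) - (-1)).toNat = cs.length - 1 by omega]
  -- evaluate A\'s prologue
  rw [rev_z]
  simp only [← hcsdef, hlen, Int.toNat_natCast]
  rw [z1_eq cs hn, hlast, hrange, List.foldl_map]
  -- apply the loop invariant
  have hfin := rzFold cs ((List.replicate cs.length (0:Int)).set (cs.length - 1) (cs.length : Int),
      (cs.length : Int) - 1, (cs.length : Int) - 1, (cs.length : Int) - 1, 1)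
    (rzBase cs hn) (cs.length - 1) (by omega)
  simp only [rzInv] at hfin
  obtain ⟨hflen, hfget, -⟩ := hfin
  -- evaluate B
  rw [rev_z_alt]
  simp only [← hcsdef]
  rw [z1_eq cs hn]
  obtain ⟨hblen, hbget⟩ := altFold cs (cs.length - 1)
    ((List.replicate cs.length (0:Int)).set (cs.length - 1) (cs.length : Int)) (z1_len cs) (by omega)
  apply List.ext_getElem?
  intro j
  by_cases hj : j < cs.length
  · rw [hbget j, (hfget j hj).1 (by omega)]
    by_cases hj1 : j < cs.length - 1
    · rw [if_pos hj1, rzOut, if_neg (by omega)]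
    · rw [if_neg hj1, z1_get cs hn j hj, rzOut, if_pos (by omega), if_pos (by omega)]
  · rw [List.getElem?_eq_none (by omega), List.getElem?_eq_none (by omega)]

-- ===== VERDICT (by name: the statement is the Claim_ definition above) =====
theorem rev_z_spec : Claim_equal_rev_z := by
  intro txt _ hpre
  unfold Spec_rev_z
  exact rev_z_eq_alt txt hpre
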